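-- pv_equiv track=rewrite | github.com/udasahai/ServerHerd | server.py | lat_long
-- ===== SOURCE A (Python) =====
-- def lat_long(str):
-- 	cords = []
-- 	temp = ""
-- 	for i in range(0,len(str)):
-- 		if str[i]=='+' or str[i]=='-':
-- 			if i!=0:
-- 				cords.append(temp)
-- 				temp = ""
-- 		temp += str[i]
-- 	cords.append(temp)
-- 	return ",".join(cords)
-- ===== SOURCE B (Python) =====
-- def lat_long(str):
--     # keep the first character as-is, then insert a comma before every sign
--     return str[:1] + "".join("," + c if c in "+-" else c for c in str[1:])
-- ===== Notes on version B (the rewrite author's own statement) =====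
-- stated objective: simpler
-- what changed: Replaces the index loop with temp buffer, segment list and join by a single comma-insertion map over the tail of the string (first char kept verbatim).
import Mathlib
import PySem

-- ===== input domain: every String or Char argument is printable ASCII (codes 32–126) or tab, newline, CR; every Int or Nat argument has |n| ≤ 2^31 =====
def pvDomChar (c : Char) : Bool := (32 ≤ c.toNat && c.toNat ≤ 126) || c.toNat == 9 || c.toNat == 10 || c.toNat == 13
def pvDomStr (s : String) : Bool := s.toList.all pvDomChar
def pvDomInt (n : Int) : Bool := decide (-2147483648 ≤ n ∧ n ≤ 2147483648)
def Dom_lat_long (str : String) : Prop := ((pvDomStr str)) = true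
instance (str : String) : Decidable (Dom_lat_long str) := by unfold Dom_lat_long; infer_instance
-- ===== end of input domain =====

-- B replaces A's index loop + temp buffer + segment list + join by a single
-- comma-insertion map over the tail of the string (objective: simpler).

-- ===== PORT A =====
-- Python strings are ported as List Char; 'for i in range(0,len(str))' with str[i]
-- is ported exactly as a fold over the enumerated character list (indices 0..n-1).
def latLongStepA (st : List (List Char) × List Char) (ic : Int × Char) :
    List (List Char) × List Char :=
  let (cords, temp) := st
  let (i, c) := ic
  let (cords, temp) :=
    if (c == '+' || c == '-') && i != 0 then (cords ++ [temp], ([] : List Char))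
    else (cords, temp)
  (cords, temp ++ [c])

def lat_long (str : String) : String :=
  let st := (PySem.List.enumerate str.toList 0).foldl latLongStepA ([], [])
  String.ofList (PySem.Chars.join [','] (st.1 ++ [st.2]))

-- ===== PORT B =====
-- str[:1] = take 1; ''.join of the per-character pieces = flatMap (exact).
def latLongInsB (c : Char) : List Char :=
  if c == '+' || c == '-' then [',', c] else [c]

def lat_long_alt (str : String) : String :=
  String.ofList (str.toList.take 1 ++ (str.toList.drop 1).flatMap latLongInsB)

-- ===== PRECONDITION & SPEC =====
def Spec_lat_long (str : String) (out : String) : Prop := out = lat_long_alt str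
instance (str : String) (out : String) : Decidable (Spec_lat_long str out) := by unfold Spec_lat_long; infer_instance

-- ===== CLAIM (what is proved, stated in full; the proofs are below) =====
def Claim_equal_lat_long : Prop := ∀ (str : String), Dom_lat_long str → Spec_lat_long str (lat_long str)

-- ===== LEMMAS AND PROOFS =====

theorem join_cons_ne (a : List Char) (l : List (List Char)) (h : l ≠ []) :
    PySem.Chars.join [','] (a :: l) = a ++ [','] ++ PySem.Chars.join [','] l := by
  cases l with
  | nil => exact absurd rfl h
  | cons b m => rw [PySem.Chars.join_cons_cons]

-- join of a nonempty list with one more element appended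
theorem join_snoc_ne (ls : List (List Char)) (u : List Char) (h : ls ≠ []) :
    PySem.Chars.join [','] (ls ++ [u])
      = PySem.Chars.join [','] ls ++ [','] ++ u := by
  induction ls with
  | nil => exact absurd rfl h
  | cons a ls ih =>
      cases ls with
      | nil => simp [PySem.Chars.join_cons_cons, PySem.Chars.join_singleton]
      | cons b m =>
          rw [List.cons_append, join_cons_ne _ _ (by simp),
              join_cons_ne _ _ (by simp), ih (by simp)]
          simp [List.append_assoc]

-- appending chars to the last segment appends them to the join
theorem join_last_push (ls : List (List Char)) (t u : List Char) :
    PySem.Chars.join [','] (ls ++ [t ++ u])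
      = PySem.Chars.join [','] (ls ++ [t]) ++ u := by
  induction ls generalizing t with
  | nil => simp [PySem.Chars.join_singleton]
  | cons a ls ih =>
      rw [List.cons_append, List.cons_append, join_cons_ne _ _ (by simp),
          join_cons_ne _ _ (by simp), ih]
      simp [List.append_assoc]

-- loop invariant: folding A's step over indices ≥ 1 appends exactly B's pieces
theorem fold_invariant (l : List Char) :
    ∀ (s : Int), 1 ≤ s → ∀ (cords : List (List Char)) (temp : List Char),
    (let st := (PySem.List.enumerate l s).foldl latLongStepA (cords, temp)
     PySem.Chars.join [','] (st.1 ++ [st.2]))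
      = PySem.Chars.join [','] (cords ++ [temp]) ++ l.flatMap latLongInsB := by
  induction l with
  | nil => intro s hs cords temp; simp [PySem.List.enumerate_nil]
  | cons c l ih =>
      intro s hs cords temp
      have hne : (s != 0) = true := by
        simp only [bne_iff_ne]; omega
      rw [PySem.List.enumerate_cons]
      simp only [List.foldl_cons]
      by_cases hc : (c == '+' || c == '-') = true
      · have hstep : latLongStepA (cords, temp) (s, c) = (cords ++ [temp], [c]) := by
          simp [latLongStepA, hc, hne]
        rw [hstep, ih (s + 1) (by omega)]
        rw [show ((cords ++ [temp]) ++ [[c]] : List (List Char))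
              = (cords ++ [temp]) ++ [([] : List Char) ++ [c]] by simp,
            join_last_push, join_snoc_ne _ _ (by simp)]
        simp [latLongInsB, hc, List.append_assoc]
      · have hstep : latLongStepA (cords, temp) (s, c) = (cords, temp ++ [c]) := by
          simp [latLongStepA, hc]
        rw [hstep, ih (s + 1) (by omega), join_last_push]
        simp [latLongInsB, hc, List.append_assoc]

theorem lat_long_eq_alt (str : String) : lat_long str = lat_long_alt str := by
  unfold lat_long lat_long_alt
  cases h : str.toList with
  | nil => simp [PySem.List.enumerate_nil, PySem.Chars.join_singleton]
  | cons c l =>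
      rw [PySem.List.enumerate_cons]
      simp only [List.foldl_cons, zero_add]
      have h0 : latLongStepA ([], []) (0, c) = ([], [c]) := by
        simp [latLongStepA]
      rw [h0]
      have hinv := fold_invariant l 1 (le_refl 1) [] [c]
      simp only at hinv
      rw [hinv]
      simp [PySem.Chars.join_singleton]

-- ===== VERDICT (by name: the statement is the Claim_ definition above) =====
theorem lat_long_spec : Claim_equal_lat_long := by
  intro str _
  unfold Spec_lat_long
  exact lat_long_eq_alt str
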